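-- pv_equiv track=rewrite | github.com/tvdyb/baseball | src/scrape_sbr_odds.py | pick_best_line
-- ===== SOURCE A (Python) =====
-- BOOK_PREFERENCE = ["draftkings", "fanduel", "betmgm", "caesars", "pointsbet"]
--
-- def pick_best_line(odds_list: list[dict], line_type: str) -> dict | None:
--     """Return the best sportsbook's opening/closing line dict."""
--     if not odds_list:
--         return None
--     by_book = {o["sportsbook"]: o for o in odds_list}
--     for book in BOOK_PREFERENCE:
--         if book in by_book:
--             return by_book[book]
--     # Fallback: first entry
--     return odds_list[0]
-- ===== SOURCE B (Python) =====
-- BOOK_PREFERENCE = ["draftkings", "fanduel", "betmgm", "caesars", "pointsbet"]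
--
-- def pick_best_line(odds_list, line_type):
--     """Single pass with a precomputed rank map; keeps the last occurrence of the
--     best-ranked book (matching dict last-write-wins), falls back to the first entry."""
--     if not odds_list:
--         return None
--     rank_of = {book: i for i, book in enumerate(BOOK_PREFERENCE)}
--     n = len(BOOK_PREFERENCE)
--     best, best_rank = odds_list[0], n
--     for o in odds_list:
--         r = rank_of.get(o["sportsbook"], n)
--         if r < best_rank or (r == best_rank and r < n):
--             best, best_rank = o, r
--     return best
-- ===== Notes on version B (the rewrite author's own statement) =====
-- stated objective: alternative
-- what changed: Instead of building a by-book dict and rescanning BOOK_PREFERENCE for the first present book, B precomputes a book->rank map and keeps the best-ranked entry (last occurrence on ties) in a single pass over odds_list.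
import Mathlib
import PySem

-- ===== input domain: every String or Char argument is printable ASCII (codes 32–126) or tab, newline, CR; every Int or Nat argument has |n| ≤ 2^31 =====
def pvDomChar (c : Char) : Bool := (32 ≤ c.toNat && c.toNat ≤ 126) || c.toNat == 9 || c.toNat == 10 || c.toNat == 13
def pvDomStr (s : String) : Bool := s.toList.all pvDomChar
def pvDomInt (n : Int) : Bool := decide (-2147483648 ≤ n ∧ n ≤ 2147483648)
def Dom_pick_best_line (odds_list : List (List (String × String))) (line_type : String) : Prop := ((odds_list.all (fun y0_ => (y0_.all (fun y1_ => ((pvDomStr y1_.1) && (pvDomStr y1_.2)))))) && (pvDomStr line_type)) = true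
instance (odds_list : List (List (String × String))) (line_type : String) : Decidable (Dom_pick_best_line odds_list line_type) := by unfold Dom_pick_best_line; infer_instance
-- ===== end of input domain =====

-- B changes the decomposition: one pass keeping the best-ranked entry via a rank map, instead of
-- building a by-book dict and rescanning the preference list (objective: alternative).

def BOOK_PREFERENCE : List String := ["draftkings", "fanduel", "betmgm", "caesars", "pointsbet"]

-- ===== PORT A =====
-- body of the dict comprehension: by_book[o["sportsbook"]] = o
def pickA_step (d : PySem.Dict String (List (String × String))) (o : List (String × String)) :
    PySem.Dict String (List (String × String)) :=
  match (PySem.Dict.mk o).get? "sportsbook" with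
  | some b => d.insert b o
  | none => d                              -- missing key: Python raises KeyError; excluded by Pre_

-- the 'for book in BOOK_PREFERENCE' loop with its early return
def pickA_scan (by_book : PySem.Dict String (List (String × String))) :
    List String → Option (List (String × String))
  | [] => none
  | b :: rest =>
    match by_book.get? b with
    | some o => some o
    | none => pickA_scan by_book rest

def pick_best_line (odds_list : List (List (String × String))) (line_type : String) :
    Option (List (String × String)) :=
  match odds_list with
  | [] => none
  | first :: _ =>
    let by_book : PySem.Dict String (List (String × String)) :=
      odds_list.foldl pickA_step PySem.Dict.empty
    match pickA_scan by_book BOOK_PREFERENCE with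
    | some o => some o
    | none => some first                   -- fallback: first entry

-- ===== PORT B =====
-- rank_of.get(o["sportsbook"], n)
def pickB_rank (rank_of : PySem.Dict String Int) (n : Int) (o : List (String × String)) : Int :=
  match (PySem.Dict.mk o).get? "sportsbook" with
  | some b => rank_of.getD b n
  | none => n                              -- missing key: Python raises KeyError; excluded by Pre_

-- the loop body: update (best, best_rank) from one entry o
def pickB_step (rank_of : PySem.Dict String Int) (n : Int)
    (st : List (String × String) × Int) (o : List (String × String)) :
    List (String × String) × Int :=
  let r : Int := pickB_rank rank_of n o
  if decide (r < st.2) || (r == st.2 && decide (r < n)) then (o, r) else st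

def pick_best_line_alt (odds_list : List (List (String × String))) (line_type : String) :
    Option (List (String × String)) :=
  match odds_list with
  | [] => none
  | first :: _ =>
    let n : Int := BOOK_PREFERENCE.length
    let rank_of : PySem.Dict String Int :=
      (PySem.List.enumerate BOOK_PREFERENCE).foldl (fun d p => d.insert p.2 p.1) PySem.Dict.empty
    let res := odds_list.foldl (pickB_step rank_of n) (first, n)
    some res.1

-- ===== PRECONDITION & SPEC =====
-- Pre_ excludes exactly the inputs on which A raises KeyError: an entry without a "sportsbook" key.
def Pre_pick_best_line (odds_list : List (List (String × String))) (line_type : String) : Prop :=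
  ∀ o ∈ odds_list, (PySem.Dict.mk o).contains "sportsbook" = true
instance (odds_list : List (List (String × String))) (line_type : String) : Decidable (Pre_pick_best_line odds_list line_type) := by unfold Pre_pick_best_line; infer_instance

def pvWitness_pick_best_line : (List (List (String × String))) × String :=
  ([[("sportsbook", "fanduel"), ("odds", "-110")], [("sportsbook", "draftkings"), ("odds", "+100")]], "open")

def Spec_pick_best_line (odds_list : List (List (String × String))) (line_type : String) (out : Option (List (String × String))) : Prop := out = pick_best_line_alt odds_list line_type
instance (odds_list : List (List (String × String))) (line_type : String) (out : Option (List (String × String))) : Decidable (Spec_pick_best_line odds_list line_type out) := by unfold Spec_pick_best_line; infer_instance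

-- ===== CLAIM (what is proved, stated in full; the proofs are below) =====
def Claim_equal_pick_best_line : Prop := ∀ (odds_list : List (List (String × String))) (line_type : String), Dom_pick_best_line odds_list line_type → Pre_pick_best_line odds_list line_type → Spec_pick_best_line odds_list line_type (pick_best_line odds_list line_type)

-- ===== LEMMAS AND PROOFS =====

-- rank of a book in BOOK_PREFERENCE (5 = absent), as an if-chain
def rk (b : String) : Int :=
  if "draftkings" = b then 0 else if "fanduel" = b then 1 else if "betmgm" = b then 2
  else if "caesars" = b then 3 else if "pointsbet" = b then 4 else 5

-- the book at a given rank
def bookAt (i : Int) : String :=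
  if i = 0 then "draftkings" else if i = 1 then "fanduel" else if i = 2 then "betmgm"
  else if i = 3 then "caesars" else if i = 4 then "pointsbet" else ""

-- rank of the first preferred book present in d (5 = none present)
def Fd (d : PySem.Dict String (List (String × String))) : Int :=
  if d.contains "draftkings" then 0 else if d.contains "fanduel" then 1
  else if d.contains "betmgm" then 2 else if d.contains "caesars" then 3
  else if d.contains "pointsbet" then 4 else 5

theorem Fd_range (d : PySem.Dict String (List (String × String))) : 0 ≤ Fd d ∧ Fd d ≤ 5 := by
  unfold Fd; split_ifs <;> omega

theorem rank_of_eval (b : String) :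
    (((((PySem.Dict.empty.insert "draftkings" (0 : Int)).insert "fanduel" 1).insert "betmgm"
      2).insert "caesars" 3).insert "pointsbet" 4).getD b 5 = rk b := by
  unfold rk
  simp only [PySem.Dict.getD_insert, PySem.Dict.getD_empty]
  split_ifs <;> first | rfl | (exfalso; simp_all)

theorem rk_range (b : String) : 0 ≤ rk b ∧ rk b ≤ 5 := by
  unfold rk; split_ifs <;> omega

set_option maxHeartbeats 1000000 in
theorem Fd_insert (d : PySem.Dict String (List (String × String))) (b0 : String)
    (o : List (String × String)) : Fd (d.insert b0 o) = min (rk b0) (Fd d) := by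
  unfold Fd rk
  simp only [PySem.Dict.contains_insert, Bool.or_eq_true, beq_iff_eq]
  split_ifs <;> first | omega | (exfalso; simp_all)

theorem bookAt_rk (b0 : String) (h : rk b0 < 5) : bookAt (rk b0) = b0 := by
  unfold rk at *; unfold bookAt
  split_ifs at * <;> simp_all

theorem rk_bookAt (i : Int) (h0 : 0 ≤ i) (h5 : i < 5) : rk (bookAt i) = i := by
  unfold bookAt
  split_ifs <;> simp_all [rk] <;> omega

theorem scan_eq (d : PySem.Dict String (List (String × String))) :
    pickA_scan d BOOK_PREFERENCE = if Fd d < 5 then d.get? (bookAt (Fd d)) else none := by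
  unfold BOOK_PREFERENCE Fd
  cases h1 : d.get? "draftkings" <;> cases h2 : d.get? "fanduel" <;>
    cases h3 : d.get? "betmgm" <;> cases h4 : d.get? "caesars" <;>
    cases h5 : d.get? "pointsbet" <;>
    simp_all [pickA_scan, bookAt, PySem.Dict.contains_eq_isSome_get?]

-- pickB_step with its closed rank map and n, with the rank lookup evaluated to rk
def stepB (st : List (String × String) × Int) (o : List (String × String)) :
    List (String × String) × Int :=
  let r : Int :=
    match (PySem.Dict.mk o).get? "sportsbook" with
    | some b => rk b
    | none => 5
  if decide (r < st.2) || (r == st.2 && decide (r < 5)) then (o, r) else st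

theorem stepB_eq :
    pickB_step ((PySem.List.enumerate BOOK_PREFERENCE).foldl (fun d p => d.insert p.2 p.1)
      PySem.Dict.empty) ((BOOK_PREFERENCE.length : Nat) : Int) = stepB := by
  funext st o
  unfold pickB_step stepB pickB_rank
  cases hb : (PySem.Dict.mk o).get? "sportsbook" <;>
    simp [BOOK_PREFERENCE, rank_of_eval]

-- invariant carried through both folds at once
theorem inv_fold (first : List (String × String)) :
    ∀ (xs : List (List (String × String))) (d : PySem.Dict String (List (String × String)))
      (best : List (String × String)) (br : Int),
      (∀ o ∈ xs, (PySem.Dict.mk o).contains "sportsbook" = true) →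
      br = Fd d →
      (br < 5 → d.get? (bookAt br) = some best) →
      (br = 5 → best = first) →
      (xs.foldl stepB (best, br)).2 = Fd (xs.foldl pickA_step d) ∧
      ((xs.foldl stepB (best, br)).2 < 5 →
        (xs.foldl pickA_step d).get? (bookAt (xs.foldl stepB (best, br)).2)
          = some (xs.foldl stepB (best, br)).1) ∧
      ((xs.foldl stepB (best, br)).2 = 5 →
        (xs.foldl stepB (best, br)).1 = first) := by
  intro xs
  induction xs with
  | nil => intro d best br _ h1 h2 h3; exact ⟨h1, h2, h3⟩
  | cons o xs ih =>
    intro d best br hpre h1 h2 h3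
    have ho := hpre o (by simp)
    obtain ⟨b0, hb0⟩ : ∃ b, (PySem.Dict.mk o).get? "sportsbook" = some b := by
      rw [PySem.Dict.contains_eq_isSome_get?] at ho
      cases h : (PySem.Dict.mk o).get? "sportsbook" <;> simp_all
    have hA : pickA_step d o = d.insert b0 o := by simp [pickA_step, hb0]
    have hstep : stepB (best, br) o =
        if rk b0 < br ∨ (rk b0 = br ∧ rk b0 < 5) then (o, rk b0) else (best, br) := by
      simp [stepB, hb0, Bool.or_eq_true, beq_iff_eq]
    have hrk := rk_range b0
    have hFd := Fd_range d
    have hFi := Fd_insert d b0 o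
    simp only [List.foldl_cons, hA, hstep]
    by_cases hc : rk b0 < br ∨ (rk b0 = br ∧ rk b0 < 5)
    · rw [if_pos hc]
      apply ih _ _ _ (fun o' ho' => hpre o' (by simp [ho']))
      · omega
      · intro h5
        rw [bookAt_rk b0 h5, PySem.Dict.get?_insert_self]
      · intro h5; omega
    · rw [if_neg hc]
      apply ih _ _ _ (fun o' ho' => hpre o' (by simp [ho']))
      · omega
      · intro h5
        have hne : bookAt br ≠ b0 := by
          intro he
          have := rk_bookAt br (by omega) h5
          rw [he] at this
          omega
        rw [PySem.Dict.get?_insert_of_ne _ _ hne]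
        exact h2 h5
      · exact h3

-- ===== VERDICT (by name: the statement is the Claim_ definition above) =====
theorem pick_best_line_spec : Claim_equal_pick_best_line := by
  intro odds_list line_type _ hpre
  unfold Spec_pick_best_line
  cases odds_list with
  | nil => rfl
  | cons first rest =>
    have hB : pick_best_line_alt (first :: rest) line_type =
        some (((first :: rest).foldl stepB (first, 5)).1) := by
      show some ((((first :: rest)).foldl (pickB_step
          ((PySem.List.enumerate BOOK_PREFERENCE).foldl (fun d p => d.insert p.2 p.1)
            PySem.Dict.empty) ((BOOK_PREFERENCE.length : Nat) : Int))
          (first, ((BOOK_PREFERENCE.length : Nat) : Int))).1) = _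
      rw [stepB_eq]
      norm_num [BOOK_PREFERENCE]
    have hA : pick_best_line (first :: rest) line_type =
        match pickA_scan ((first :: rest).foldl pickA_step PySem.Dict.empty) BOOK_PREFERENCE with
        | some o => some o
        | none => some first := rfl
    have hF0 : (5 : Int) = Fd PySem.Dict.empty := by
      simp [Fd, PySem.Dict.contains_empty]
    obtain ⟨e1, e2, e3⟩ := inv_fold first (first :: rest) PySem.Dict.empty first 5
      hpre hF0 (by omega) (fun _ => rfl)
    rw [hA, hB, scan_eq]
    have hFr := Fd_range ((first :: rest).foldl pickA_step PySem.Dict.empty)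
    by_cases h5 : ((first :: rest).foldl stepB (first, 5)).2 < 5
    · rw [if_pos (by omega)]
      rw [← e1, e2 h5]
    · rw [if_neg (by omega)]
      rw [e3 (by omega)]
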